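-- pv_equiv track=rewrite | github.com/TheJim123/Projekt-Tomo-vaje | resitve/zanke.py | razveljavi_disemvowel
-- ===== SOURCE A (Python) =====
-- def razveljavi_disemvowel(niz):
--     '''zvezdice v disemvowlanem nizu nadosmesti s samoglasniki s konca niza'''
--     st_zvezd = niz.count('*') #da bomo vedeli, kje se začno samoglasniki
--     if st_zvezd == 0: # ni kaj delati
--         return niz
--     samoglasniki = niz[-st_zvezd:] # odrežemo ustrezen del niza
--     counter = 0
--     message = ''
--     for znak in niz[:-st_zvezd]:
--         if znak == '*':
--             message += samoglasniki[counter]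
--             counter += 1
--         else: message += znak
--     return message
-- ===== SOURCE B (Python) =====
-- def razveljavi_disemvowel(niz):
--     '''zvezdice v disemvowlanem nizu nadosmesti s samoglasniki s konca niza'''
--     st_zvezd = niz.count('*')
--     if st_zvezd == 0:
--         return niz
--     samoglasniki = niz[-st_zvezd:]
--     parts = niz[:-st_zvezd].split('*')
--     return parts[0] + ''.join(v + p for v, p in zip(samoglasniki, parts[1:]))
-- ===== Notes on version B (the rewrite author's own statement) =====
-- stated objective: idiomatic
-- what changed: Replaces the per-character scan with its counter and branch by a delimiter split of the body on the asterisk and a join that interleaves the segments with the trailing vowels.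
import Mathlib
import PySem

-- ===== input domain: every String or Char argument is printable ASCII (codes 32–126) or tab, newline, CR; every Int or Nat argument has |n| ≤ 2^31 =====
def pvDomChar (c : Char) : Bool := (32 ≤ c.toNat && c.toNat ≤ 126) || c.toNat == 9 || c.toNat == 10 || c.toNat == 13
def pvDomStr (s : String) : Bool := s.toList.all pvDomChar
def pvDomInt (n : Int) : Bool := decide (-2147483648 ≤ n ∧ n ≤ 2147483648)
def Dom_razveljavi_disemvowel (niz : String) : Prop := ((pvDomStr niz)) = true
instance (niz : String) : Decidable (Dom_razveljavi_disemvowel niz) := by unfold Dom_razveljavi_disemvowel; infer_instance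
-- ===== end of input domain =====

-- B replaces A's per-character scan (counter + branch on '*') with a split of the body on '*'
-- interleaved with the trailing vowels (objective: more idiomatic).

-- ===== PORT A =====
-- A's for-loop with its (counter, message) state as a left fold over the body's characters.
-- samoglasniki[counter] is ported with pyGet?; the .getD ' ' default is never taken, since the
-- counter stays below the number of '*' in the body, which is at most |samoglasniki|
-- (so Python's indexing never raises here, on any input).
def razveljavi_disemvowel (niz : String) : String :=
  let st_zvezd : Nat := PySem.Str.count niz "*"
  if st_zvezd = 0 then niz
  else
    let samoglasniki : List Char := PySem.List.slice niz.toList (some (-(st_zvezd : Int))) none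
    let body : List Char := PySem.List.slice niz.toList none (some (-(st_zvezd : Int)))
    let st := body.foldl
      (fun (st : Nat × List Char) znak =>
        if znak = '*' then (st.1 + 1, st.2 ++ [((PySem.List.pyGet? samoglasniki (st.1 : Int)).getD ' ')])
        else (st.1, st.2 ++ [znak]))
      (0, [])
    String.ofList st.2

-- ===== PORT B =====
def razveljavi_disemvowel_alt (niz : String) : String :=
  let st_zvezd : Nat := PySem.Str.count niz "*"
  if st_zvezd = 0 then niz
  else
    let samoglasniki : List Char := PySem.List.slice niz.toList (some (-(st_zvezd : Int))) none
    let parts : List (List Char) := List.splitOn '*' (PySem.List.slice niz.toList none (some (-(st_zvezd : Int))))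
    String.ofList (parts.headD [] ++ ((samoglasniki.zip parts.tail).map (fun vp => vp.1 :: vp.2)).flatten)

-- ===== PRECONDITION & SPEC =====
def Spec_razveljavi_disemvowel (niz : String) (out : String) : Prop := out = razveljavi_disemvowel_alt niz
instance (niz : String) (out : String) : Decidable (Spec_razveljavi_disemvowel niz out) := by unfold Spec_razveljavi_disemvowel; infer_instance

-- ===== CLAIM (what is proved, stated in full; the proofs are below) =====
def Claim_equal_razveljavi_disemvowel : Prop := ∀ (niz : String), Dom_razveljavi_disemvowel niz → Spec_razveljavi_disemvowel niz (razveljavi_disemvowel niz)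

-- ===== LEMMAS AND PROOFS =====

-- PySem count with a single-character pattern is List.count (no PySem lemma names this fact).
theorem count_go_single (a : Char) : ∀ (s : List Char) (fuel acc : Nat), s.length ≤ fuel →
    PySem.Chars.count.go [a] fuel s acc = acc + s.count a := by
  intro s
  induction s with
  | nil => intro fuel acc h; cases fuel <;> simp [PySem.Chars.count.go]
  | cons h t ih =>
    intro fuel acc hle
    cases fuel with
    | zero => simp at hle
    | succ n =>
      simp only [PySem.Chars.count.go, List.isPrefixOf]
      by_cases hah : a = h
      · subst hah
        simp [ih n (acc+1) (by simpa using hle)]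
        omega
      · simp [hah, Ne.symm hah, ih n acc (by simpa using hle)]

theorem count_single (s : String) (a : Char) :
    PySem.Str.count s (String.ofList [a]) = s.toList.count a := by
  have h := count_go_single a s.toList s.length 0 (by simp)
  simp [PySem.Str.count_eq, PySem.Chars.count, h]

-- the two slices with negative index -k, for 1 ≤ k ≤ |s|
theorem slice_from_neg {α : Type} (s : List α) (k : Nat) (h1 : 1 ≤ k) (h : k ≤ s.length) :
    PySem.List.slice s (some (-(k : Int))) none = s.drop (s.length - k) := by
  have hc : PySem.List.clampIdx s.length (-(k : Int)) = s.length - k := by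
    unfold PySem.List.clampIdx; split_ifs <;> omega
  simp [PySem.List.slice, hc]

theorem slice_to_neg {α : Type} (s : List α) (k : Nat) (h1 : 1 ≤ k) (h : k ≤ s.length) :
    PySem.List.slice s none (some (-(k : Int))) = s.take (s.length - k) := by
  have hc : PySem.List.clampIdx s.length (-(k : Int)) = s.length - k := by
    unfold PySem.List.clampIdx; split_ifs <;> omega
  simp [PySem.List.slice, hc]

-- A's loop, restated as the structural recursion it performs (counter as a parameter).
def aRep (sam : List Char) : List Char → Nat → List Char
  | [], _ => []
  | z :: rest, c =>
    if z = '*' then ((PySem.List.pyGet? sam (c : Int)).getD ' ') :: aRep sam rest (c + 1)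
    else z :: aRep sam rest c

theorem aFold_eq_aRep (sam : List Char) : ∀ (body : List Char) (c : Nat) (acc : List Char),
    (body.foldl
      (fun (st : Nat × List Char) znak =>
        if znak = '*' then (st.1 + 1, st.2 ++ [((PySem.List.pyGet? sam (st.1 : Int)).getD ' ')])
        else (st.1, st.2 ++ [znak]))
      (c, acc)).2 = acc ++ aRep sam body c := by
  intro body
  induction body with
  | nil => simp [aRep]
  | cons z rest ih =>
    intro c acc
    simp only [PySem.List.pyGet?_natCast] at ih
    by_cases hz : z = '*'
    · simp [hz, aRep, ih]
    · simp [hz, aRep, ih]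

-- the heart: A's replace-by-counter scan equals B's split-and-interleave
theorem aRep_eq_split (sam : List Char) : ∀ (body : List Char) (c : Nat),
    body.count '*' + c ≤ sam.length →
    aRep sam body c = (List.splitOn '*' body).headD [] ++
      (((sam.drop c).zip (List.splitOn '*' body).tail).map (fun vp => vp.1 :: vp.2)).flatten := by
  intro body
  induction body with
  | nil => intro c h; simp [aRep, List.splitOn]
  | cons z rest ih =>
    intro c h
    simp only [List.splitOn] at ih ⊢
    obtain ⟨p0, ps, hsplit⟩ : ∃ p0 ps, List.splitOnP (fun x => x == '*') rest = p0 :: ps := by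
      cases hs : List.splitOnP (fun x => x == '*') rest with
      | nil => exact absurd hs (List.splitOnP_ne_nil _ rest)
      | cons p0 ps => exact ⟨p0, ps, rfl⟩
    by_cases hz : z = '*'
    · subst hz
      have hc : c < sam.length := by simp [List.count_cons] at h; omega
      have hdrop : sam.drop c = sam[c] :: sam.drop (c + 1) := (List.getElem_cons_drop hc).symm
      simp only [aRep, List.splitOnP_cons, beq_self_eq_true, if_pos rfl]
      rw [ih (c + 1) (by simp at h ⊢; omega)]
      rw [hsplit]
      simp [PySem.List.pyGet?_natCast, List.getElem?_eq_getElem hc]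
      conv_rhs => rw [hdrop]
      simp only [List.zip_cons_cons, List.map_cons, List.flatten_cons, List.cons_append]
    · simp only [aRep, if_neg hz, List.splitOnP_cons, beq_iff_eq]
      rw [ih c (by simp [hz] at h ⊢; omega)]
      simp [hsplit]

-- ===== VERDICT (by name: the statement is the Claim_ definition above) =====
theorem razveljavi_disemvowel_spec : Claim_equal_razveljavi_disemvowel := by
  intro niz _
  unfold Spec_razveljavi_disemvowel razveljavi_disemvowel razveljavi_disemvowel_alt
  by_cases h0 : PySem.Str.count niz "*" = 0
  · have h0' : PySem.Chars.count niz.toList ['*'] = 0 := by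
      simpa [PySem.Str.count_eq] using h0
    simp [h0']
  · simp only [if_neg h0]
    have hkcount : PySem.Str.count niz "*" = niz.toList.count '*' := by
      rw [show ("*" : String) = String.ofList ['*'] from rfl, count_single]
    have hk1 : 1 ≤ PySem.Str.count niz "*" := Nat.one_le_iff_ne_zero.mpr h0
    have hklen : PySem.Str.count niz "*" ≤ niz.toList.length := by
      rw [hkcount]; exact List.count_le_length
    rw [slice_from_neg _ _ hk1 hklen, slice_to_neg _ _ hk1 hklen]
    have hcnt : (niz.toList.take (niz.toList.length - PySem.Str.count niz "*")).count '*' +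
        (niz.toList.drop (niz.toList.length - PySem.Str.count niz "*")).count '*' = niz.toList.count '*' := by
      rw [← List.count_append, List.take_append_drop]
    have hlen : (niz.toList.drop (niz.toList.length - PySem.Str.count niz "*")).length
        = PySem.Str.count niz "*" := by
      simp only [List.length_drop]; omega
    rw [aFold_eq_aRep, aRep_eq_split]
    · simp
    · have hA : PySem.Chars.count niz.toList ['*'] = niz.toList.count '*' := by
        simpa [PySem.Str.count_eq] using hkcount
      rw [hlen]; omega
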